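-- pv_equiv track=rewrite | github.com/ftatiana-nv/NeMo-Retriever | nemo_retriever/src/nemo_retriever/relational_db/population/graph/cte/common.py | extract_arguments_from_expression
-- ===== SOURCE A (Python) =====
-- def get_inner_expression(expression: str):
--     opening_indexes = []
--     closing_indexes = []
--     for index, char in enumerate(expression):
--         if char == "(":
--             opening_indexes.append(index)
--         if char == ")":
--             closing_indexes.append(index)
--         diff = len(closing_indexes) - len(opening_indexes)
--         if diff > 0:
--             break
--     if diff > 0:
--         last_index = closing_indexes[-diff]
--         return expression[:last_index]
--     return expression
--
-- def extract_arguments_from_expression(expression: str, max_num_of_arguments: int = 2):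
--     expression_copy = get_inner_expression(expression)
--     commas_indexes = [i for i, char in enumerate(expression_copy) if char == ","]
--     if not commas_indexes:
--         return [expression]
--     commas_indexes.reverse()
--     expressions = []
--     i = 0
--     while len(expressions) <= max_num_of_arguments and i < len(commas_indexes):
--         current_comma_index = commas_indexes[i]
--         current_part = expression_copy[current_comma_index + 1 :]
--         inner_expression = get_inner_expression(current_part)
--         is_full_expression = inner_expression == current_part
--         if is_full_expression:
--             expressions.append(inner_expression)
--             expression_copy = expression_copy[:current_comma_index]
--         i += 1
--         # if i == len(commas_indexes) - 1:
--     expressions.append(expression_copy)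
--     expressions.reverse()
--     return expressions
-- ===== SOURCE B (Python) =====
-- def extract_arguments_from_expression(expression, max_num_of_arguments=2):
--     # Single left-to-right pass finds the prefix before the first unmatched ')';
--     # a single right-to-left pass splits it at the commas after which no
--     # unmatched ')' follows, capped like the original.
--     depth = 0
--     cut = len(expression)
--     for k, ch in enumerate(expression):
--         if ch == '(':
--             depth += 1
--         elif ch == ')':
--             if depth == 0:
--                 cut = k
--                 break
--             depth -= 1
--     copy = expression[:cut]
--     if ',' not in copy:
--         return [expression]
--     parts = []
--     seg = []  # chars of the current segment, in reverse order
--     m = 0     # min over all prefix parenthesis-balances of the current segment (always <= 0)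
--     rest = list(copy)
--     while rest and len(parts) <= max_num_of_arguments:
--         ch = rest[-1]
--         if ch == ',' and m == 0:
--             rest.pop()
--             parts.append(''.join(reversed(seg)))
--             seg = []
--         else:
--             rest.pop()
--             seg.append(ch)
--             if ch == '(':
--                 m = min(0, m + 1)
--             elif ch == ')':
--                 m = min(0, m - 1)
--     parts.append(''.join(rest) + ''.join(reversed(seg)))
--     parts.reverse()
--     return parts
-- ===== Notes on version B (the rewrite author's own statement) =====
-- stated objective: faster
-- what changed: A re-runs get_inner_expression (a fresh paren scan) on the suffix after every comma and repeatedly slices the working string; B finds the inner region with one left-to-right depth scan and then splits it in one right-to-left pass that keeps a running minimum of the parenthesis balance, so no rescans at all.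
-- outside the precondition, e.g. on extract_arguments_from_expression('', 2): A raises UnboundLocalError, B returns ['']; on extract_arguments_from_expression(',', 2): A raises UnboundLocalError, B returns ['', '']; on extract_arguments_from_expression('a,,b', 2): A raises UnboundLocalError, B returns ['a', '', 'b']
-- crash fix: On the empty expression and on expressions whose inner region has an empty top-level piece within the argument cap (e.g. ',' or 'a,,b'), A raises UnboundLocalError inside get_inner_expression, while B returns the split with empty-string arguments (e.g. ['', ''] for ','). — e.g. on extract_arguments_from_expression(",", 2): A raises UnboundLocalError, B returns ["", ""]
import Mathlib
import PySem

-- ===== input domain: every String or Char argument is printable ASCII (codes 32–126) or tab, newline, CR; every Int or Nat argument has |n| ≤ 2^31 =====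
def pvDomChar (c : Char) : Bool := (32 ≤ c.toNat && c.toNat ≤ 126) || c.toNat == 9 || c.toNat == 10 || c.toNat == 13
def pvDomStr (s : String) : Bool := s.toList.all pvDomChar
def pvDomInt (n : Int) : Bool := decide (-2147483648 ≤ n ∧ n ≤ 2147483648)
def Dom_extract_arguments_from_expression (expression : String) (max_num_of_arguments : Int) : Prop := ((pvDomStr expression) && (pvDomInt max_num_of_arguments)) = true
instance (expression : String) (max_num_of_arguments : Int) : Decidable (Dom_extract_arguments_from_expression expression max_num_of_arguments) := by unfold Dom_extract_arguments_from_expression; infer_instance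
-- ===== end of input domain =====

-- B replaces A's repeated get_inner_expression rescans of each suffix by one
-- left-to-right depth scan plus one right-to-left pass keeping a running minimum
-- of parenthesis balance (objective: faster, linear instead of quadratic).

-- ===== PORT A =====
-- get_inner_expression's loop; the index lists are carried literally.  `diff` is a
-- parameter because Python leaves it unassigned when the loop body never runs
-- (empty string: Python raises UnboundLocalError; such inputs are outside Pre_; here the
-- initial value 0 is returned instead).
def pvInnerLoop : List Char → Int → List Int → List Int → Int → (List Int × List Int × Int)
  | [], _, opens, closes, diff => (opens, closes, diff)
  | c :: rest, idx, opens, closes, _ =>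
    let opens := if c = '(' then opens ++ [idx] else opens
    let closes := if c = ')' then closes ++ [idx] else closes
    let diff : Int := (closes.length : Int) - (opens.length : Int)
    if 0 < diff then (opens, closes, diff)
    else pvInnerLoop rest (idx + 1) opens closes diff

-- get_inner_expression
def pvGetInner (s : List Char) : List Char :=
  let r := pvInnerLoop s 0 [] [] 0
  if 0 < r.2.2 then
    match PySem.List.pyGet? r.2.1 (-r.2.2) with   -- closing_indexes[-diff]
    | some li => PySem.List.slice s none (some li) -- expression[:last_index]
    | none => s                                    -- unreachable: the list is nonempty when 0 < diff
  else s

-- [i for i, char in enumerate(expression_copy) if char == ","]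
def pvCommas (l : List Char) : List Int :=
  ((PySem.List.enumerate l 0).filter (fun p => p.2 == ',')).map (fun p => p.1)

-- the while loop of extract_arguments_from_expression (state: expressions, expression_copy)
def pvExtractLoop : List Int → Int → List (List Char) → List Char → (List (List Char) × List Char)
  | [], _, exprs, copy => (exprs, copy)
  | c :: rest, maxN, exprs, copy =>
    if (exprs.length : Int) ≤ maxN then
      let part := PySem.List.slice copy (some (c + 1)) none   -- expression_copy[c+1:]
      let inner := pvGetInner part
      if inner = part then
        pvExtractLoop rest maxN (exprs ++ [inner]) (PySem.List.slice copy none (some c))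
      else
        pvExtractLoop rest maxN exprs copy
    else (exprs, copy)

def extract_arguments_from_expression (expression : String) (max_num_of_arguments : Int) : List String :=
  let s := expression.toList
  let copy := pvGetInner s
  let commas := pvCommas copy
  if commas = [] then [expression]
  else
    let r := pvExtractLoop commas.reverse max_num_of_arguments [] copy
    ((r.1 ++ [r.2]).reverse).map (fun l => String.mk l)

-- ===== PORT B =====
-- first loop of Source B: index of the first unmatched ')' (none = no such, cut = len)
def pvCut : List Char → Nat → Int → Option Nat
  | [], _, _ => none
  | c :: rest, k, depth =>
    if c = '(' then pvCut rest (k + 1) (depth + 1)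
    else if c = ')' then
      if depth = 0 then some k else pvCut rest (k + 1) (depth - 1)
    else pvCut rest (k + 1) depth

-- the while loop of Source B; first argument is the `rest` list consumed from its
-- end, i.e. here the still-unscanned prefix of copy in reverse order; `seg` is
-- Python's seg list (current segment chars in reverse order), `m` its minimal
-- prefix balance; returns parts with the final element already appended.
def pvScan : List Char → Int → List Char → Int → List (List Char) → List (List Char)
  | [], _, seg, _, parts => parts ++ [seg.reverse]
  | c :: rest, maxN, seg, m, parts =>
    if (parts.length : Int) ≤ maxN then
      if c = ',' ∧ m = 0 then
        pvScan rest maxN [] 0 (parts ++ [seg.reverse])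
      else
        pvScan rest maxN (seg ++ [c])
          (if c = '(' then min 0 (m + 1) else if c = ')' then min 0 (m - 1) else m) parts
    else parts ++ [(c :: rest).reverse ++ seg.reverse]

def extract_arguments_from_expression_alt (expression : String) (max_num_of_arguments : Int) : List String :=
  let s := expression.toList
  let copy := match pvCut s 0 0 with
    | some k => s.take k    -- expression[:cut]
    | none => s
  if ',' ∈ copy then
    ((pvScan copy.reverse max_num_of_arguments [] 0 []).reverse).map (fun l => String.mk l)
  else [expression]

-- ===== PRECONDITION & SPEC =====
-- Spec-side vocabulary (independent of both ports): the prefix of the string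
-- before its first unmatched ')' (the region the comma splitting works on) …
def pvPreCopy : List Char → Nat → List Char
  | [], _ => []
  | c :: rest, d =>
    if c = ')' then (if d = 0 then [] else c :: pvPreCopy rest (d - 1))
    else if c = '(' then c :: pvPreCopy rest (d + 1)
    else c :: pvPreCopy rest d

-- character balance contribution
def pvDelta (c : Char) : Int := if c = '(' then 1 else if c = ')' then -1 else 0

-- … the minimum over all prefix parenthesis-balances of a list (always ≤ 0) …
def pvMB (l : List Char) : Int := l.foldr (fun c acc => min 0 (pvDelta c + acc)) 0

-- … and the positions of the top-level commas: those after which no unmatched ')' follows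
def pvTops (l : List Char) : List Nat :=
  (List.range l.length).filter (fun c => l[c]? == some ',' && pvMB (l.drop (c + 1)) == 0)

-- exactly the inputs on which Python A raises UnboundLocalError (get_inner_expression
-- of an empty string): the empty expression, or — with a nonnegative cap — some
-- top-level comma among the rightmost (cap+1) of them is followed immediately by
-- the end of the inner region or by another comma (an empty top-level piece)
def pvRaises (expression : String) (max_num_of_arguments : Int) : Bool :=
  let s := expression.toList
  if s.isEmpty then true
  else if max_num_of_arguments < 0 then false
  else
    let copy := pvPreCopy s 0
    let T := pvTops copy
    (T.drop (T.length - (max_num_of_arguments + 1).toNat)).any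
      (fun c => c + 1 == copy.length || copy[c + 1]? == some ',')

-- Pre_ excludes exactly the inputs where Python A raises (UnboundLocalError on an
-- empty piece, e.g. "", "," or "a,,b"); on every input where A returns, Pre_ holds.
def Pre_extract_arguments_from_expression (expression : String) (max_num_of_arguments : Int) : Prop :=
  pvRaises expression max_num_of_arguments = false
instance (expression : String) (max_num_of_arguments : Int) : Decidable (Pre_extract_arguments_from_expression expression max_num_of_arguments) := by unfold Pre_extract_arguments_from_expression; infer_instance

def pvWitness_extract_arguments_from_expression : String × Int := ("f(a,b),g(c)", 2)

-- OPTIONAL crash-fix block: on inputs with an empty top-level piece (e.g. "," or "a,,b")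
-- A raises UnboundLocalError, while B returns the split with empty-string arguments.
def Raises_extract_arguments_from_expression (expression : String) (max_num_of_arguments : Int) : Prop :=
  pvRaises expression max_num_of_arguments = true
instance (expression : String) (max_num_of_arguments : Int) : Decidable (Raises_extract_arguments_from_expression expression max_num_of_arguments) := by unfold Raises_extract_arguments_from_expression; infer_instance

def pvRaiseWitness_extract_arguments_from_expression : String × Int := (",", 2)
def pvRaiseWitnessOut_extract_arguments_from_expression : List String := ["", ""]

def Spec_extract_arguments_from_expression (expression : String) (max_num_of_arguments : Int) (out : List String) : Prop := out = extract_arguments_from_expression_alt expression max_num_of_arguments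
instance (expression : String) (max_num_of_arguments : Int) (out : List String) : Decidable (Spec_extract_arguments_from_expression expression max_num_of_arguments out) := by unfold Spec_extract_arguments_from_expression; infer_instance

-- ===== CLAIM (what is proved, stated in full; the proofs are below) =====
def Claim_equal_extract_arguments_from_expression : Prop := ∀ (expression : String) (max_num_of_arguments : Int), Dom_extract_arguments_from_expression expression max_num_of_arguments → Pre_extract_arguments_from_expression expression max_num_of_arguments → Spec_extract_arguments_from_expression expression max_num_of_arguments (extract_arguments_from_expression expression max_num_of_arguments)

def Claim_raises_extract_arguments_from_expression : Prop := (∀ (expression : String) (max_num_of_arguments : Int), Dom_extract_arguments_from_expression expression max_num_of_arguments → Raises_extract_arguments_from_expression expression max_num_of_arguments → ¬ Pre_extract_arguments_from_expression expression max_num_of_arguments) ∧ (Dom_extract_arguments_from_expression (pvRaiseWitness_extract_arguments_from_expression.1) (pvRaiseWitness_extract_arguments_from_expression.2) ∧ Raises_extract_arguments_from_expression (pvRaiseWitness_extract_arguments_from_expression.1) (pvRaiseWitness_extract_arguments_from_expression.2) ∧ extract_arguments_from_expression_alt (pvRaiseWitness_extract_arguments_from_expression.1) (pvRaiseWitness_extract_arguments_from_expression.2)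 = pvRaiseWitnessOut_extract_arguments_from_expression)

-- ===== LEMMAS AND PROOFS =====

lemma pvMB_nil : pvMB [] = 0 := rfl

lemma pvCut_open (rest : List Char) (k : Nat) (d : Int) :
    pvCut ('(' :: rest) k d = pvCut rest (k + 1) (d + 1) := by simp [pvCut]

lemma pvCut_close (rest : List Char) (k : Nat) (d : Int) :
    pvCut (')' :: rest) k d = if d = 0 then some k else pvCut rest (k + 1) (d - 1) := by
  simp [pvCut]

lemma pvCut_other (c : Char) (rest : List Char) (k : Nat) (d : Int)
    (ho : c ≠ '(') (hc : c ≠ ')') :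
    pvCut (c :: rest) k d = pvCut rest (k + 1) d := by simp [pvCut, ho, hc]

lemma pvMB_cons (c : Char) (l : List Char) : pvMB (c :: l) = min 0 (pvDelta c + pvMB l) := rfl

lemma pvMB_nonpos (l : List Char) : pvMB l ≤ 0 := by
  cases l with
  | nil => simp [pvMB_nil]
  | cons c l => rw [pvMB_cons]; exact min_le_left _ _

-- pvCut finds no unmatched ')' iff every prefix balance stays ≥ -d
lemma pvCut_none_iff (l : List Char) : ∀ (k : Nat) (d : Int), 0 ≤ d →
    (pvCut l k d = none ↔ -d ≤ pvMB l) := by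
  induction l with
  | nil => intro k d hd; simp [pvCut, pvMB_nil]; omega
  | cons c rest ih =>
    intro k d hd
    by_cases ho : c = '('
    · subst ho
      rw [pvMB_cons, pvCut_open, ih (k+1) (d+1) (by omega)]
      have := pvMB_nonpos rest
      simp [pvDelta]; omega
    · by_cases hc : c = ')'
      · subst hc
        rw [pvMB_cons, pvCut_close]
        have hmb := pvMB_nonpos rest
        by_cases h0 : d = 0
        · subst h0; simp [pvDelta]; omega
        · rw [if_neg h0, ih (k+1) (d-1) (by omega)]
          simp [pvDelta]; omega
      · rw [pvMB_cons, pvCut_other c rest k d ho hc, ih (k+1) d hd]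
        have := pvMB_nonpos rest
        simp [pvDelta, if_neg ho, if_neg hc]; omega

lemma pvCut_some_bounds (l : List Char) : ∀ (k : Nat) (d : Int) (j : Nat),
    pvCut l k d = some j → k ≤ j ∧ j < k + l.length := by
  induction l with
  | nil => intro k d j h; simp [pvCut] at h
  | cons c rest ih =>
    intro k d j h
    by_cases ho : c = '('
    · subst ho; rw [pvCut_open] at h
      have := ih (k+1) (d+1) j h; simp at this ⊢; omega
    · by_cases hc : c = ')'
      · subst hc; rw [pvCut_close] at h
        by_cases h0 : d = 0
        · rw [if_pos h0] at h
          have hkj : k = j := by simpa using h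
          subst hkj; simp
        · rw [if_neg h0] at h
          have := ih (k+1) (d-1) j h; simp at this ⊢; omega
      · rw [pvCut_other c rest k d ho hc] at h
        have := ih (k+1) d j h; simp at this ⊢; omega

-- step shapes of A's get_inner loop (diff recomputed each iteration)
lemma pvInnerLoop_step_open (rest : List Char) (idx : Int) (opens closes : List Int) (d0 : Int)
    (h : closes.length ≤ opens.length) :
    pvInnerLoop ('(' :: rest) idx opens closes d0
      = pvInnerLoop rest (idx + 1) (opens ++ [idx]) closes ((closes.length : Int) - ((opens.length : Int) + 1)) := by
  simp only [pvInnerLoop, Char.reduceEq, if_true, if_false, List.length_append,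
    List.length_cons, List.length_nil]
  rw [if_neg (by push_cast; omega)]
  norm_num

lemma pvInnerLoop_step_break (rest : List Char) (idx : Int) (opens closes : List Int) (d0 : Int)
    (h : opens.length = closes.length) :
    pvInnerLoop (')' :: rest) idx opens closes d0 = (opens, closes ++ [idx], 1) := by
  simp only [pvInnerLoop, Char.reduceEq, if_true, if_false, List.length_append,
    List.length_cons, List.length_nil]
  rw [if_pos (by push_cast; omega)]
  simp only [Prod.mk.injEq, true_and]
  push_cast; omega

lemma pvInnerLoop_step_close (rest : List Char) (idx : Int) (opens closes : List Int) (d0 : Int)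
    (h : closes.length + 1 ≤ opens.length) :
    pvInnerLoop (')' :: rest) idx opens closes d0
      = pvInnerLoop rest (idx + 1) opens (closes ++ [idx]) (((closes.length : Int) + 1) - (opens.length : Int)) := by
  simp only [pvInnerLoop, Char.reduceEq, if_true, if_false, List.length_append,
    List.length_cons, List.length_nil]
  rw [if_neg (by push_cast; omega)]
  norm_num

lemma pvInnerLoop_step_other (c : Char) (rest : List Char) (idx : Int) (opens closes : List Int)
    (d0 : Int) (ho : c ≠ '(') (hc : c ≠ ')') (h : closes.length ≤ opens.length) :
    pvInnerLoop (c :: rest) idx opens closes d0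
      = pvInnerLoop rest (idx + 1) opens closes ((closes.length : Int) - (opens.length : Int)) := by
  simp only [pvInnerLoop, if_neg ho, if_neg hc]
  rw [if_neg (by push_cast; omega)]

-- relation between A's get_inner loop and B's cut scan
lemma pvInnerLoop_cut (l : List Char) : ∀ (k : Nat) (opens closes : List Int) (d : Nat),
    opens.length = closes.length + d →
    (pvCut l k (d : Int) = none → (pvInnerLoop l (k : Int) opens closes (-(d : Int))).2.2 ≤ 0) ∧
    (∀ j : Nat, pvCut l k (d : Int) = some j →
      (pvInnerLoop l (k : Int) opens closes (-(d : Int))).2.2 = 1 ∧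
      (pvInnerLoop l (k : Int) opens closes (-(d : Int))).2.1.getLast? = some (j : Int)) := by
  induction l with
  | nil =>
    intro k opens closes d hlen
    refine ⟨fun _ => ?_, fun j h => by simp [pvCut] at h⟩
    simp [pvInnerLoop]
  | cons c rest ih =>
    intro k opens closes d hlen
    by_cases ho : c = '('
    · subst ho
      rw [pvInnerLoop_step_open rest (k : Int) opens closes _ (by omega),
        show ((closes.length : Int) - ((opens.length : Int) + 1)) = -((d + 1 : Nat) : Int) by push_cast [hlen]; ring,
        show ((k : Int) + 1) = ((k + 1 : Nat) : Int) by push_cast; ring,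
        pvCut_open, show ((d : Int) + 1) = ((d + 1 : Nat) : Int) by push_cast; ring]
      exact ih (k + 1) (opens ++ [(k : Int)]) closes (d + 1) (by simp [hlen]; omega)
    · by_cases hc : c = ')'
      · subst hc
        by_cases h0 : d = 0
        · subst h0
          simp only [Nat.cast_zero, neg_zero]
          rw [pvCut_close, pvInnerLoop_step_break rest (k : Int) opens closes _ (by omega), if_pos rfl]
          constructor
          · intro hnone; simp at hnone
          · intro j hsome
            have hkj : k = j := by simpa using hsome
            subst hkj
            exact ⟨rfl, by simp⟩
        · obtain ⟨d', rfl⟩ : ∃ d', d = d' + 1 := ⟨d - 1, by omega⟩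
          rw [pvCut_close, pvInnerLoop_step_close rest (k : Int) opens closes _ (by omega),
            show (((closes.length : Int) + 1) - (opens.length : Int)) = -((d' : Nat) : Int) by push_cast [hlen]; ring,
            show ((k : Int) + 1) = ((k + 1 : Nat) : Int) by push_cast; ring,
            if_neg (by push_cast; omega),
            show ((d' + 1 : Nat) : Int) - 1 = ((d' : Nat) : Int) by push_cast; ring]
          exact ih (k + 1) opens (closes ++ [(k : Int)]) d' (by simp [hlen]; omega)
      · rw [pvInnerLoop_step_other c rest (k : Int) opens closes _ ho hc (by omega),
          show ((closes.length : Int) - (opens.length : Int)) = -((d : Nat) : Int) by push_cast [hlen]; ring,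
          show ((k : Int) + 1) = ((k + 1 : Nat) : Int) by push_cast; ring,
          pvCut_other c rest k (d : Int) ho hc]
        exact ih (k + 1) opens closes d hlen

-- A's get_inner_expression equals B's cut-prefix
lemma pvGetInner_eq (s : List Char) :
    pvGetInner s = (match pvCut s 0 0 with | some k => s.take k | none => s) := by
  have h := pvInnerLoop_cut s 0 [] [] 0 rfl
  simp only [Nat.cast_zero, neg_zero] at h
  cases hcut : pvCut s 0 0 with
  | none =>
    have h1 := h.1 (by exact_mod_cast hcut)
    simp only [pvGetInner]
    rw [if_neg (by omega)]
  | some j =>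
    have h2 := h.2 j (by exact_mod_cast hcut)
    simp only [pvGetInner, h2.1]
    rw [if_pos (by norm_num : (0:Int) < 1), show -(1:Int) = -1 from rfl,
      PySem.List.pyGet?_neg_one, h2.2]
    show PySem.List.slice s none (some ((j : Nat) : Int)) = s.take j
    rw [PySem.List.slice_to_natCast]

lemma pvGetInner_eq_self_iff (s : List Char) : pvGetInner s = s ↔ pvCut s 0 0 = none := by
  rw [pvGetInner_eq]
  cases hcut : pvCut s 0 0 with
  | none => simp
  | some j =>
    simp only []
    constructor
    · intro h
      have hb := pvCut_some_bounds s 0 0 j hcut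
      have : (s.take j).length = s.length := by rw [h]
      rw [List.length_take] at this
      omega
    · intro h; cases h

-- commas of a snoc
lemma pvCommas_append (l : List Char) (c : Char) :
    pvCommas (l ++ [c]) = pvCommas l ++ (if c = ',' then [(l.length : Int)] else []) := by
  simp only [pvCommas, PySem.List.enumerate_append, List.filter_append, List.map_append]
  congr 1
  have : PySem.List.enumerate [c] (0 + (l.length : Int)) = [((l.length : Int), c)] := by
    simp [PySem.List.enumerate_cons, PySem.List.enumerate_nil]
  rw [this]
  by_cases h : c = ','
  · simp [h]
  · simp [h]

lemma pvCommas_nil_iff (l : List Char) : pvCommas l = [] ↔ ',' ∉ l := by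
  simp only [pvCommas, List.map_eq_nil_iff, List.filter_eq_nil_iff]
  constructor
  · intro h hmem
    obtain ⟨k, hk, hget⟩ := List.mem_iff_getElem.mp hmem
    have : ((0 : Int) + k, l[k]) ∈ PySem.List.enumerate l 0 := by
      rw [PySem.List.mem_enumerate_iff]; exact ⟨k, hk, rfl⟩
    have := h _ this
    simp [hget] at this
  · intro h p hp
    rw [PySem.List.mem_enumerate_iff] at hp
    obtain ⟨k, hk, rfl⟩ := hp
    simp only [beq_iff_eq]
    intro hc
    exact h (hc ▸ List.getElem_mem hk)

-- the segment of copy between positions a and b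
def pvSeg (copy : List Char) (a b : Nat) : List Char := (copy.take b).drop a

lemma pvSeg_self (copy : List Char) (a : Nat) : pvSeg copy a a = [] := by
  apply List.drop_eq_nil_of_le
  simp [List.length_take]

lemma pvSeg_zero (copy : List Char) (b : Nat) : pvSeg copy 0 b = copy.take b := rfl

lemma pvSeg_cons (copy : List Char) (a b : Nat) (ha : a < b) (hb : b ≤ copy.length) :
    pvSeg copy a b = copy[a]'(by omega) :: pvSeg copy (a + 1) b := by
  unfold pvSeg
  rw [List.drop_eq_getElem_cons (by rw [List.length_take]; omega)]
  congr 1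
  exact List.getElem_take

lemma pvTake_append_seg (copy : List Char) (a b : Nat) (hab : a ≤ b) (hb : b ≤ copy.length) :
    copy.take a ++ pvSeg copy a b = copy.take b := by
  unfold pvSeg
  rw [show copy.take a = (copy.take b).take a by rw [List.take_take, min_eq_left hab]]
  exact List.take_append_drop a (copy.take b)

-- the main simulation: B's char-by-char scan over the reversed unscanned prefix
-- computes exactly A's comma loop followed by the final append
lemma pvMain (copy : List Char) (maxN : Int) : ∀ (n : Nat) (j : Nat) (parts : List (List Char)),
    n ≤ j → j ≤ copy.length →
    pvScan ((copy.take n).reverse) maxN ((pvSeg copy n j).reverse) (pvMB (pvSeg copy n j)) parts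
      = (pvExtractLoop ((pvCommas (copy.take n)).reverse) maxN parts (copy.take j)).1
        ++ [(pvExtractLoop ((pvCommas (copy.take n)).reverse) maxN parts (copy.take j)).2] := by
  intro n
  induction n with
  | zero =>
    intro j parts _ _
    simp [pvScan, pvCommas, PySem.List.enumerate_nil, pvExtractLoop, pvSeg_zero]
  | succ n ih =>
    intro j parts hnj hj
    have hn : n < copy.length := by omega
    have htake : copy.take (n + 1) = copy.take n ++ [copy[n]] := by
      rw [List.take_succ, List.getElem?_eq_getElem hn]; rfl
    have hrev : (copy.take (n + 1)).reverse = copy[n] :: (copy.take n).reverse := by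
      rw [htake]; simp
    rw [hrev]
    by_cases hcap : (parts.length : Int) ≤ maxN
    · by_cases hcomma : copy[n] = ','
      · -- a comma at position n: head of A's reversed comma list
        have hcommas : (pvCommas (copy.take (n + 1))).reverse
            = (n : Int) :: (pvCommas (copy.take n)).reverse := by
          rw [htake, pvCommas_append, if_pos hcomma]
          simp [List.length_take, Nat.min_eq_left (le_of_lt hn)]
        rw [hcommas]
        have hpart : PySem.List.slice (copy.take j) (some ((n : Int) + 1)) none
            = pvSeg copy (n + 1) j := by
          rw [show ((n : Int) + 1) = ((n + 1 : Nat) : Int) by push_cast; ring,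
            PySem.List.slice_from_natCast]
          rfl
        by_cases hm : pvMB (pvSeg copy (n + 1) j) = 0
        · -- accepted comma: both sides emit the segment and truncate to position n
          have hfull : pvGetInner (pvSeg copy (n + 1) j) = pvSeg copy (n + 1) j := by
            rw [pvGetInner_eq_self_iff, pvCut_none_iff _ 0 0 le_rfl]
            omega
          have hA : pvExtractLoop ((n : Int) :: (pvCommas (copy.take n)).reverse) maxN parts (copy.take j)
              = pvExtractLoop ((pvCommas (copy.take n)).reverse) maxN
                  (parts ++ [pvSeg copy (n + 1) j]) (copy.take n) := by
            simp only [pvExtractLoop]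
            rw [if_pos hcap, hpart, hfull, if_pos rfl]
            congr 1
            rw [PySem.List.slice_to_natCast, List.take_take, min_eq_left (by omega)]
          have hB : pvScan (copy[n] :: (copy.take n).reverse) maxN
                ((pvSeg copy (n + 1) j).reverse) (pvMB (pvSeg copy (n + 1) j)) parts
              = pvScan ((copy.take n).reverse) maxN [] 0
                  (parts ++ [pvSeg copy (n + 1) j]) := by
            simp only [pvScan]
            rw [if_pos hcap, if_pos ⟨hcomma, hm⟩]
            simp
          rw [hA, hB]
          have := ih n (parts ++ [pvSeg copy (n + 1) j]) (le_refl n) (by omega)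
          rw [pvSeg_self, pvMB_nil] at this
          simpa using this
        · -- rejected comma: A leaves its state unchanged, B keeps extending the segment
          have hsome : ∃ k, pvCut (pvSeg copy (n + 1) j) 0 0 = some k := by
            cases hcut : pvCut (pvSeg copy (n + 1) j) 0 0 with
            | none =>
              exfalso
              have := (pvCut_none_iff (pvSeg copy (n + 1) j) 0 0 le_rfl).mp hcut
              have := pvMB_nonpos (pvSeg copy (n + 1) j)
              omega
            | some k => exact ⟨k, rfl⟩
          obtain ⟨k, hcut⟩ := hsome
          have hnotfull : pvGetInner (pvSeg copy (n + 1) j) ≠ pvSeg copy (n + 1) j := by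
            rw [pvGetInner_eq, hcut]
            intro h
            have _hb := pvCut_some_bounds (pvSeg copy (n + 1) j) 0 0 k hcut
            have hlen := congrArg List.length h
            simp at hlen
            omega
          have hA : pvExtractLoop ((n : Int) :: (pvCommas (copy.take n)).reverse) maxN parts (copy.take j)
              = pvExtractLoop ((pvCommas (copy.take n)).reverse) maxN parts (copy.take j) := by
            simp only [pvExtractLoop]
            rw [if_pos hcap, hpart, if_neg hnotfull]
          have hsegc : pvSeg copy n j = copy[n] :: pvSeg copy (n + 1) j :=
            pvSeg_cons copy n j (by omega) hj
          have hB : pvScan (copy[n] :: (copy.take n).reverse) maxN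
                ((pvSeg copy (n + 1) j).reverse) (pvMB (pvSeg copy (n + 1) j)) parts
              = pvScan ((copy.take n).reverse) maxN ((pvSeg copy n j).reverse)
                  (pvMB (pvSeg copy n j)) parts := by
            simp only [pvScan]
            rw [if_pos hcap, if_neg (by rintro ⟨_, h⟩; exact hm h)]
            rw [hsegc, hcomma]
            congr 1
            · simp
            · have := pvMB_nonpos (pvSeg copy (n + 1) j)
              rw [pvMB_cons]
              simp [pvDelta]
              omega
          rw [hA, hB]
          exact ih j parts (by omega) hj
      · -- not a comma: A's comma list is unchanged, B extends the segment
        have hcommas : (pvCommas (copy.take (n + 1))).reverse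
            = (pvCommas (copy.take n)).reverse := by
          rw [htake, pvCommas_append, if_neg hcomma, List.append_nil]
        rw [hcommas]
        have hsegc : pvSeg copy n j = copy[n] :: pvSeg copy (n + 1) j :=
          pvSeg_cons copy n j (by omega) hj
        have hB : pvScan (copy[n] :: (copy.take n).reverse) maxN
              ((pvSeg copy (n + 1) j).reverse) (pvMB (pvSeg copy (n + 1) j)) parts
            = pvScan ((copy.take n).reverse) maxN ((pvSeg copy n j).reverse)
                (pvMB (pvSeg copy n j)) parts := by
          simp only [pvScan]
          rw [if_pos hcap, if_neg (by rintro ⟨h, _⟩; exact hcomma h)]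
          rw [hsegc]
          congr 1
          · simp
          · rw [pvMB_cons]
            have hnp := pvMB_nonpos (pvSeg copy (n + 1) j)
            by_cases hop : copy[n] = '('
            · rw [if_pos hop, hop]
              simp only [pvDelta, Char.reduceEq, if_true]
              ring_nf
            · rw [if_neg hop]
              by_cases hcl : copy[n] = ')'
              · rw [if_pos hcl, hcl]
                simp only [pvDelta, Char.reduceEq, if_false, if_true]
                ring_nf
              · rw [if_neg hcl]
                simp only [pvDelta, if_neg hop, if_neg hcl]
                omega
        rw [hB]
        exact ih j parts (by omega) hj
    · -- argument cap reached: both sides stop, the last piece is copy.take j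
      have hlast : copy.take (n + 1) ++ pvSeg copy (n + 1) j = copy.take j :=
        pvTake_append_seg copy (n + 1) j hnj hj
      have hB : pvScan (copy[n] :: (copy.take n).reverse) maxN
            ((pvSeg copy (n + 1) j).reverse) (pvMB (pvSeg copy (n + 1) j)) parts
          = parts ++ [copy.take j] := by
        simp only [pvScan]
        rw [if_neg hcap]
        rw [show copy[n] :: (copy.take n).reverse = (copy.take (n + 1)).reverse by rw [hrev]]
        simp [hlast]
      rw [hB]
      cases hl : (pvCommas (copy.take (n + 1))).reverse with
      | nil => simp [pvExtractLoop]
      | cons a b =>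
        simp only [pvExtractLoop]
        rw [if_neg hcap]

-- ===== VERDICT (by name: the statement is the Claim_ definition above) =====
theorem extract_arguments_from_expression_spec : Claim_equal_extract_arguments_from_expression := by
  intro expression maxN _hdom _hpre
  unfold Spec_extract_arguments_from_expression
  simp only [extract_arguments_from_expression, extract_arguments_from_expression_alt]
  rw [pvGetInner_eq]
  set copy := (match pvCut expression.toList 0 0 with
    | some k => expression.toList.take k
    | none => expression.toList) with hcopy
  by_cases hmem : ',' ∈ copy
  · rw [if_neg (fun hnil => (pvCommas_nil_iff copy).mp hnil hmem), if_pos hmem]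
    have hmain := pvMain copy maxN copy.length copy.length [] le_rfl le_rfl
    rw [pvSeg_self, pvMB_nil, List.take_length] at hmain
    rw [List.reverse_nil] at hmain
    rw [hmain]
  · rw [if_pos ((pvCommas_nil_iff copy).mpr hmem), if_neg hmem]

theorem extract_arguments_from_expression_raises : Claim_raises_extract_arguments_from_expression := by
  unfold Claim_raises_extract_arguments_from_expression
  refine ⟨?_, by decide⟩
  intro expression maxN _hdom hr hp
  unfold Raises_extract_arguments_from_expression at hr
  unfold Pre_extract_arguments_from_expression at hp
  rw [hr] at hp
  exact Bool.noConfusion hp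

-- deliberate self-check: via the theorem above, the raise witness is indeed excluded from Pre_
theorem pvRaiseWitnessExcluded_ok :
    ¬ Pre_extract_arguments_from_expression
        pvRaiseWitness_extract_arguments_from_expression.1
        pvRaiseWitness_extract_arguments_from_expression.2 := by
  have h := extract_arguments_from_expression_raises
  unfold Claim_raises_extract_arguments_from_expression at h
  exact h.1 _ _ h.2.1 h.2.2.1
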